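-- pv_equiv track=rewrite | github.com/ldct/cp | codeforces/E115/D/D.py | freq_line
-- ===== SOURCE A (Python) =====
-- from collections import Counter
--
-- def freq_line(problems, _idx):
--
--     freqs = Counter([p[_idx] for p in problems])
--
--     ret = 0
--     for v in freqs.values():
--         ret += (v*(v-1)*(v-2)) // 6
--     return ret
--
--
--     ret = 0
--     for i in range(len(problems)):
--         for j in range(i+1, len(problems)):
--             for k in range(j+1, len(problems)):
--                 xs = set()
--                 ys = set()
--                 for idx in [i,j,k]:
--                     xs.add(problems[idx][0])
--                     ys.add(problems[idx][1])
--                 if len([xs, ys][_idx]) == 1: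
--                     ret += 1
--     return ret
-- ===== SOURCE B (Python) =====
-- def freq_line(problems, _idx):
--     # For each position, triples having it as first element = C(later equal values, 2).
--     ret = 0
--     tail = [p[_idx] for p in problems]
--     while tail:
--         x = tail.pop(0)
--         c = tail.count(x)
--         ret += c * (c - 1) // 2
--     return ret
-- ===== Notes on version B (the rewrite author's own statement) =====
-- stated objective: alternative
-- what changed: Replaced the Counter-of-values plus C(v,3) formula by a suffix scan: for each element count later equal values c and add c*(c-1)//2 (triples with that element first); no frequency table or cubic formula.
import Mathlib
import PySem

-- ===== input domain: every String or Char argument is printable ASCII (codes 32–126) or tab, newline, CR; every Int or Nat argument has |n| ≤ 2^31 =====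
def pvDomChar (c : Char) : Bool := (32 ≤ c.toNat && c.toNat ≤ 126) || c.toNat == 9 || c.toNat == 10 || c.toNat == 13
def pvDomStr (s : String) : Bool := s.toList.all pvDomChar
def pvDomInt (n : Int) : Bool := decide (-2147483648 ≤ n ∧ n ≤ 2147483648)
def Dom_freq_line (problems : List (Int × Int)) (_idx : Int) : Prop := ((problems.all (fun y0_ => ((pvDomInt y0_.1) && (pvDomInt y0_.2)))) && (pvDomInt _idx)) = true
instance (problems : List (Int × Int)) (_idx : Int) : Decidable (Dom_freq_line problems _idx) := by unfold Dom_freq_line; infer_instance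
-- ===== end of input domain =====

-- B replaces A's Counter + C(v,3) formula by a suffix scan adding C(#later equal values, 2) per element; alternative decomposition, not faster.


-- ===== PORT A =====
-- Python tuple indexing p[_idx] on a pair; indices other than 0,1,-1,-2 raise IndexError and are excluded by Pre_ (the 0 branch is never reached there)
def pvPairGet (p : Int × Int) (i : Int) : Int :=
  if i = 0 ∨ i = -2 then p.1 else if i = 1 ∨ i = -1 then p.2 else 0

def freq_line (problems : List (Int × Int)) (_idx : Int) : Int :=
  let freqs := PySem.Dict.counter (problems.map (fun p => pvPairGet p _idx))
  freqs.values.foldl (fun ret v => ret + PySem.Int.floordiv (v * (v - 1) * (v - 2)) 6) 0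

-- ===== PORT B =====
-- the 'while tail: x = tail.pop(0); c = tail.count(x); ret += c*(c-1)//2' loop of Source B
def pvAltLoop (ret : Int) (tail : List Int) : Int :=
  match tail with
  | [] => ret
  | x :: tail =>
      let c : Int := (tail.count x : Int)
      pvAltLoop (ret + PySem.Int.floordiv (c * (c - 1)) 2) tail

def freq_line_alt (problems : List (Int × Int)) (_idx : Int) : Int :=
  pvAltLoop 0 (problems.map (fun p => pvPairGet p _idx))

-- ===== PRECONDITION & SPEC =====
-- Pre_ excludes nonempty lists with _idx outside {-2,-1,0,1}: there both A and B raise IndexError on p[_idx] (on [] neither program indexes, so any _idx is admitted).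
def Pre_freq_line (problems : List (Int × Int)) (_idx : Int) : Prop :=
  problems = [] ∨ _idx = 0 ∨ _idx = 1 ∨ _idx = -1 ∨ _idx = -2
instance (problems : List (Int × Int)) (_idx : Int) : Decidable (Pre_freq_line problems _idx) := by unfold Pre_freq_line; infer_instance

def pvWitness_freq_line : (List (Int × Int)) × Int := ([(1, 2), (1, 3), (1, 4), (2, 3)], 0)

def Spec_freq_line (problems : List (Int × Int)) (_idx : Int) (out : Int) : Prop := out = freq_line_alt problems _idx
instance (problems : List (Int × Int)) (_idx : Int) (out : Int) : Decidable (Spec_freq_line problems _idx out) := by unfold Spec_freq_line; infer_instance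

-- ===== CLAIM (what is proved, stated in full; the proofs are below) =====
def Claim_equal_freq_line : Prop := ∀ (problems : List (Int × Int)) (_idx : Int), Dom_freq_line problems _idx → Pre_freq_line problems _idx → Spec_freq_line problems _idx (freq_line problems _idx)

-- ===== LEMMAS AND PROOFS =====

theorem two_mul_choose_two (d : Nat) : 2 * (d + 1).choose 2 = (d + 1) * d := by
  induction d with
  | zero => rfl
  | succ e ih =>
      rw [Nat.choose_succ_succ, Nat.mul_add, ih, Nat.choose_one_right]
      ring

theorem six_mul_choose_three (e : Nat) : 6 * (e + 2).choose 3 = (e + 2) * (e + 1) * e := by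
  induction e with
  | zero => rfl
  | succ f ih =>
      have h2 : 6 * (f + 2).choose 2 = 3 * ((f + 2) * (f + 1)) := by
        rw [← two_mul_choose_two (f + 1)]; ring
      rw [Nat.choose_succ_succ, Nat.mul_add, ih, h2]
      ring

theorem fd2 (c : Nat) : PySem.Int.floordiv ((c : Int) * ((c : Int) - 1)) 2 = (c.choose 2 : Int) := by
  cases c with
  | zero => decide
  | succ d =>
      have h : ((d + 1 : Nat) : Int) * (((d + 1 : Nat) : Int) - 1) = (((d + 1) * d : Nat) : Int) := by
        push_cast; ring
      rw [h, show (2 : Int) = ((2 : Nat) : Int) from rfl, PySem.Int.floordiv_natCast]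
      have hn : (d + 1) * d / 2 = (d + 1).choose 2 := by
        have := two_mul_choose_two d
        omega
      rw [hn]

theorem fd6 (c : Nat) : PySem.Int.floordiv ((c : Int) * ((c : Int) - 1) * ((c : Int) - 2)) 6 = (c.choose 3 : Int) := by
  match c with
  | 0 => decide
  | 1 => decide
  | (e + 2) =>
      have h : ((e + 2 : Nat) : Int) * (((e + 2 : Nat) : Int) - 1) * (((e + 2 : Nat) : Int) - 2)
          = (((e + 2) * (e + 1) * e : Nat) : Int) := by push_cast; ring
      rw [h, show (6 : Int) = ((6 : Nat) : Int) from rfl, PySem.Int.floordiv_natCast]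
      have hn : (e + 2) * (e + 1) * e / 6 = (e + 2).choose 3 := by
        have := six_mul_choose_three e
        omega
      rw [hn]

-- number of triples, computed as B does (head recursion)
def pvT : List Int → Nat
  | [] => 0
  | x :: t => (t.count x).choose 2 + pvT t

theorem pvAltLoop_eq (ret : Int) (l : List Int) : pvAltLoop ret l = ret + (pvT l : Int) := by
  induction l generalizing ret with
  | nil => simp [pvAltLoop, pvT]
  | cons x t ih =>
      simp only [pvAltLoop, pvT]
      rw [ih, fd2]
      push_cast
      ring

-- number of triples as A computes it: sum over distinct values of C(count, 3)
def pvS (l : List Int) : Nat := ∑ k ∈ l.toFinset, (l.count k).choose 3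

theorem pvS_cons (x : Int) (l : List Int) : pvS (x :: l) = (l.count x).choose 2 + pvS l := by
  unfold pvS
  rw [List.toFinset_cons]
  by_cases hx : x ∈ l.toFinset
  · rw [Finset.insert_eq_self.mpr hx]
    rw [← Finset.add_sum_erase _ _ hx, ← Finset.add_sum_erase _ (fun k => (l.count k).choose 3) hx]
    have hcongr : ∑ k ∈ l.toFinset.erase x, ((x :: l).count k).choose 3
        = ∑ k ∈ l.toFinset.erase x, (l.count k).choose 3 := by
      apply Finset.sum_congr rfl
      intro k hk
      have hne : x ≠ k := (Finset.ne_of_mem_erase hk).symm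
      simp [hne]
    rw [hcongr]
    have hcx : (x :: l).count x = l.count x + 1 := by simp [List.count_cons]
    rw [hcx, Nat.choose_succ_succ, show Nat.succ 2 = 3 from rfl]
    omega
  · rw [Finset.sum_insert hx]
    have hc0 : l.count x = 0 := by
      rw [List.count_eq_zero]
      intro h; exact hx (List.mem_toFinset.mpr h)
    have hcongr : ∑ k ∈ l.toFinset, ((x :: l).count k).choose 3
        = ∑ k ∈ l.toFinset, (l.count k).choose 3 := by
      apply Finset.sum_congr rfl
      intro k hk
      have hne : x ≠ k := by rintro rfl; exact hx hk
      simp [hne]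
    rw [hcongr]
    simp [hc0]
    decide

theorem pvS_eq_pvT (l : List Int) : pvS l = pvT l := by
  induction l with
  | nil => rfl
  | cons x t ih => rw [pvS_cons, pvT, ih]

theorem toFinset_ofList (l : List Int) : (PySem.Set.ofList l).toFinset = l.toFinset := by
  apply Finset.ext
  intro a
  simp [List.mem_toFinset, PySem.Set.mem_ofList]

theorem freq_line_eq (l : List Int) :
    (PySem.Dict.counter l).values.foldl (fun ret v => ret + PySem.Int.floordiv (v * (v - 1) * (v - 2)) 6) 0
      = (pvS l : Int) := by
  have hv : (PySem.Dict.counter l).values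
      = (PySem.Set.ofList l).map (fun k => ((l.count k : Nat) : Int)) := by
    show (PySem.Dict.counter l).items.map (·.2) = _
    rw [PySem.Dict.items_counter, List.map_map]
    rfl
  rw [hv, PySem.List.foldl_add]
  rw [List.map_map]
  have hmap : ((fun v => PySem.Int.floordiv (v * (v - 1) * (v - 2)) 6) ∘ fun k => ((l.count k : Nat) : Int))
      = fun k => ((l.count k).choose 3 : Int) := by
    funext k
    simp only [Function.comp]
    exact fd6 (l.count k)
  rw [hmap]
  have hsum : ((PySem.Set.ofList l).map fun k => ((l.count k).choose 3 : Int)).sum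
      = ((PySem.Set.ofList l).toFinset.sum fun k => ((l.count k).choose 3 : Int)) := by
    rw [List.sum_toFinset _ (PySem.Set.nodup_ofList l)]
  rw [hsum, toFinset_ofList]
  unfold pvS
  push_cast
  simp

-- ===== VERDICT (by name: the statement is the Claim_ definition above) =====
theorem freq_line_spec : Claim_equal_freq_line := by
  intro problems _idx _hdom _hpre
  show freq_line problems _idx = freq_line_alt problems _idx
  unfold freq_line freq_line_alt
  rw [freq_line_eq, pvAltLoop_eq, pvS_eq_pvT]
  ring
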